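-- pv_equiv track=rewrite | github.com/JungDayoon/AlgorithmStudy | Programmers/[60060] 가사 검색/starempty/Fail_string.py | solution
-- ===== SOURCE A (Python) =====
-- def solution(words, queries):
--     answer = []
--     for i in queries:
--         cnt = 0
--         length = len(i)
--         if i[0] == "?":
--             i = i[::-1]  #문자열 뒤집는 방법
--             postfix = i.split("?")[0][::-1]  # ?이후 문자 뒤집어서 저장
--             for j in words:
--                 if len(postfix) == 0 and len(j) == length:
--                     cnt += 1
--                 elif j.endswith(postfix) and len(j) == length:
--                     cnt += 1
--             answer.append(cnt)
--         else:
--             prefix = i.split("?")[0]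
--             for j in words:
--                 if len(prefix) == 0 and len(j) == length:
--                     cnt += 1
--                 elif j.startswith(prefix) and len(j) == length:
--                     cnt += 1
--             answer.append(cnt)
--
--     return answer
-- ===== SOURCE B (Python) =====
-- def solution(words, queries):
--     # Index words by length once; each query then scans only its own length bucket.
--     buckets = {}
--     for w in words:
--         buckets.setdefault(len(w), []).append(w)
--     answer = []
--     for q in queries:
--         bucket = buckets.get(len(q), [])
--         if q.startswith("?"):
--             suf = q[::-1].split("?")[0][::-1]  # text after the last '?'
--             answer.append(sum(1 for w in bucket if w.endswith(suf)))
--         else: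
--             pre = q.split("?")[0]  # text before the first '?'
--             answer.append(sum(1 for w in bucket if w.startswith(pre)))
--     return answer
-- ===== Notes on version B (the rewrite author's own statement) =====
-- stated objective: faster
-- what changed: B builds a dict bucketing the words by length in one pass, so each query counts matches only over the bucket of its own length with a single startswith/endswith test instead of A's full scan of all words with per-word length checks per query.
import Mathlib
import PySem

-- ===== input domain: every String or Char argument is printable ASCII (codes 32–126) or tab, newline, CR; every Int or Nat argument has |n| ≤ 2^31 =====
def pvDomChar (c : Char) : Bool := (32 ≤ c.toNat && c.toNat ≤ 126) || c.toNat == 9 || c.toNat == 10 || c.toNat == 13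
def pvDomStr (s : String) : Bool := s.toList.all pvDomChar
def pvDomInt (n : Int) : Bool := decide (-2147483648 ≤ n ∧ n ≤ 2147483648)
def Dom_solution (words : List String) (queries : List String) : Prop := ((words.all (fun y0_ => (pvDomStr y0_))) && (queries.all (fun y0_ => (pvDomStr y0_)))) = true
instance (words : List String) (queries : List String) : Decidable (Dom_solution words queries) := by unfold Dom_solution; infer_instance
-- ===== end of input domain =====

-- B replaces A's full scan of all words for every query with a dict that buckets the
-- words by length once, so each query only scans the words of its own length.

-- ===== PORT A =====
def solution (words : List String) (queries : List String) : List Int :=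
  queries.foldl (fun answer i =>
    let length := PySem.Str.len i
    if PySem.Str.pyGet? i 0 = some '?' then
      let irev := (PySem.Str.slice? i none none (-1)).getD ""        -- i = i[::-1]
      let pfx :=                                                      -- postfix = i.split("?")[0][::-1]
        (PySem.Str.slice? ((PySem.List.pyGet? ((PySem.Str.split? irev "?").getD []) 0).getD "")
          none none (-1)).getD ""
      let cnt := words.foldl (fun cnt j =>
        if PySem.Str.len pfx = 0 ∧ PySem.Str.len j = length then cnt + 1
        else if PySem.Str.endswith j pfx = true ∧ PySem.Str.len j = length then cnt + 1
        else cnt) (0 : Int)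
      answer ++ [cnt]
    else
      let pfx := (PySem.List.pyGet? ((PySem.Str.split? i "?").getD []) 0).getD ""  -- prefix
      let cnt := words.foldl (fun cnt j =>
        if PySem.Str.len pfx = 0 ∧ PySem.Str.len j = length then cnt + 1
        else if PySem.Str.startswith j pfx = true ∧ PySem.Str.len j = length then cnt + 1
        else cnt) (0 : Int)
      answer ++ [cnt]) []

-- ===== PORT B =====
def solution_alt (words : List String) (queries : List String) : List Int :=
  let buckets : PySem.Dict Int (List String) :=
    words.foldl (fun d w => d.modify (PySem.Str.len w) [] (· ++ [w])) PySem.Dict.empty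
  queries.foldl (fun answer q =>
    let bucket := buckets.getD (PySem.Str.len q) []
    if PySem.Str.startswith q "?" then
      let suf :=                                                      -- q[::-1].split("?")[0][::-1]
        (PySem.Str.slice? ((PySem.List.pyGet?
            ((PySem.Str.split? ((PySem.Str.slice? q none none (-1)).getD "") "?").getD []) 0).getD "")
          none none (-1)).getD ""
      answer ++ [(bucket.countP (fun w => PySem.Str.endswith w suf) : Int)]
    else
      let pre := (PySem.List.pyGet? ((PySem.Str.split? q "?").getD []) 0).getD ""
      answer ++ [(bucket.countP (fun w => PySem.Str.startswith w pre) : Int)]) []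

-- ===== PRECONDITION & SPEC =====
-- Pre_ excludes inputs with an empty query string, on which A's 'i[0]' raises IndexError.
def Pre_solution (words : List String) (queries : List String) : Prop := "" ∉ queries
instance (words : List String) (queries : List String) : Decidable (Pre_solution words queries) := by unfold Pre_solution; infer_instance
def pvWitness_solution : List String × List String := (["abc", "ab", ""], ["a?c", "??", "ab", "?c"])
def Spec_solution (words : List String) (queries : List String) (out : List Int) : Prop := out = solution_alt words queries
instance (words : List String) (queries : List String) (out : List Int) : Decidable (Spec_solution words queries out) := by unfold Spec_solution; infer_instance

-- ===== CLAIM (what is proved, stated in full; the proofs are below) =====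
def Claim_equal_solution : Prop := ∀ (words : List String) (queries : List String), Dom_solution words queries → Pre_solution words queries → Spec_solution words queries (solution words queries)

-- ===== LEMMAS AND PROOFS =====

-- The length-keyed dict built by B holds exactly the words of each length, in order.
lemma bucket_eq (words : List String) (L : Int) :
    (words.foldl (fun d w => d.modify (PySem.Str.len w) [] (· ++ [w]))
        (PySem.Dict.empty : PySem.Dict Int (List String))).getD L []
      = words.filter (fun w => PySem.Str.len w == L) := by
  have h := PySem.Dict.getD_foldl_modify_append
      (words.map (fun w => (PySem.Str.len w, w)))
      (PySem.Dict.empty : PySem.Dict Int (List String)) L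
  rw [List.foldl_map] at h
  simpa [Function.comp_def, List.filter_map] using h

lemma endswith_empty (s : String) : PySem.Str.endswith s "" = true := by
  simp [PySem.Str.endswith_eq, PySem.Chars.endswith_iff]

lemma startswith_empty (s : String) : PySem.Str.startswith s "" = true := by
  simp [PySem.Str.startswith_eq, PySem.Chars.startswith_iff]

lemma len_eq_zero (s : String) (h : PySem.Str.len s = 0) : s = "" := by
  rw [PySem.Str.len_eq] at h
  apply String.toList_eq_nil_iff.mp
  cases hs : s.toList with
  | nil => rfl
  | cons c t => exfalso; rw [hs] at h; simp at h; omega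

-- A's nested-if count over all words equals B's count over the length bucket.
lemma count_eq (words : List String) (L : Int) (pfx : String)
    (test : String → String → Bool)
    (hempty : ∀ s, test s "" = true) :
    words.foldl (fun cnt j =>
        if PySem.Str.len pfx = 0 ∧ PySem.Str.len j = L then cnt + 1
        else if test j pfx = true ∧ PySem.Str.len j = L then cnt + 1
        else cnt) (0 : Int)
      = ((words.filter (fun w => PySem.Str.len w == L)).countP (fun w => test w pfx) : Int) := by
  have hcong : words.foldl (fun cnt j =>
        if PySem.Str.len pfx = 0 ∧ PySem.Str.len j = L then cnt + 1
        else if test j pfx = true ∧ PySem.Str.len j = L then cnt + 1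
        else cnt) (0 : Int)
      = words.foldl (fun cnt j =>
        if ((PySem.Str.len pfx = 0 ∧ PySem.Str.len j = L) ∨ (test j pfx = true ∧ PySem.Str.len j = L))
        then cnt + 1 else cnt) (0 : Int) := by
    refine PySem.List.foldl_congr_mem _ _ _ _ ?_
    intro acc x _
    split_ifs <;> first | rfl | tauto
  rw [hcong, PySem.List.foldl_ite_add_one]
  rw [List.countP_filter]
  have hpcong : List.countP
      (fun x => decide ((PySem.Str.len pfx = 0 ∧ PySem.Str.len x = L) ∨ (test x pfx = true ∧ PySem.Str.len x = L))) words
      = List.countP (fun w => test w pfx && (PySem.Str.len w == L)) words := by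
    refine List.countP_congr ?_
    intro x _
    by_cases hpe : pfx = ""
    · subst hpe
      by_cases hL : PySem.Str.len x = L <;> simp [hempty]
    · have h0 : ¬ PySem.Str.len pfx = 0 := fun h => hpe (len_eq_zero pfx h)
      by_cases hL : PySem.Str.len x = L <;> by_cases ht : test x pfx = true <;>
        simp [hpe, ht]
  rw [hpcong]
  simp

-- a nonempty string starts with "?" iff its first character is '?'
lemma head_question (q : String) (hq : q ≠ "") :
    (PySem.Str.pyGet? q 0 = some '?') ↔ PySem.Str.startswith q "?" = true := by
  have hne : q.toList ≠ [] := fun h => hq (String.toList_eq_nil_iff.mp h)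
  cases hl : q.toList with
  | nil => exact absurd hl hne
  | cons c t =>
    rw [PySem.Str.pyGet?_eq, PySem.Chars.pyGet?_eq_listPyGet?, hl,
        PySem.Str.startswith_eq, hl]
    constructor
    · intro h
      have hc : c = '?' := by simpa [PySem.List.pyGet?, PySem.List.pyIdx?] using h
      subst hc
      rw [PySem.Chars.startswith_iff]
      exact ⟨t, by simp⟩
    · intro h
      rw [PySem.Chars.startswith_iff] at h
      obtain ⟨r, hr⟩ := h
      have hc : '?' = c := by
        have := congrArg (fun l => l.head?) hr
        simpa using this
      subst hc
      simp [PySem.List.pyGet?, PySem.List.pyIdx?]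

-- ===== VERDICT (by name: the statement is the Claim_ definition above) =====
theorem solution_spec : Claim_equal_solution := by
  intro words queries _ hpre
  unfold Spec_solution solution solution_alt
  simp only []
  have hrec : ∀ (qs : List String) (acc : List Int), "" ∉ qs →
      qs.foldl (fun answer i =>
        let length := PySem.Str.len i
        if PySem.Str.pyGet? i 0 = some '?' then
          let irev := (PySem.Str.slice? i none none (-1)).getD ""
          let pfx :=
            (PySem.Str.slice? ((PySem.List.pyGet? ((PySem.Str.split? irev "?").getD []) 0).getD "")
              none none (-1)).getD ""
          let cnt := words.foldl (fun cnt j =>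
            if PySem.Str.len pfx = 0 ∧ PySem.Str.len j = length then cnt + 1
            else if PySem.Str.endswith j pfx = true ∧ PySem.Str.len j = length then cnt + 1
            else cnt) (0 : Int)
          answer ++ [cnt]
        else
          let pfx := (PySem.List.pyGet? ((PySem.Str.split? i "?").getD []) 0).getD ""
          let cnt := words.foldl (fun cnt j =>
            if PySem.Str.len pfx = 0 ∧ PySem.Str.len j = length then cnt + 1
            else if PySem.Str.startswith j pfx = true ∧ PySem.Str.len j = length then cnt + 1
            else cnt) (0 : Int)
          answer ++ [cnt]) acc
      = qs.foldl (fun answer q =>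
          let bucket := (words.foldl (fun d w => d.modify (PySem.Str.len w) [] (· ++ [w]))
            (PySem.Dict.empty : PySem.Dict Int (List String))).getD (PySem.Str.len q) []
          if PySem.Str.startswith q "?" then
            let suf :=
              (PySem.Str.slice? ((PySem.List.pyGet?
                  ((PySem.Str.split? ((PySem.Str.slice? q none none (-1)).getD "") "?").getD []) 0).getD "")
                none none (-1)).getD ""
            answer ++ [(bucket.countP (fun w => PySem.Str.endswith w suf) : Int)]
          else
            let pre := (PySem.List.pyGet? ((PySem.Str.split? q "?").getD []) 0).getD ""
            answer ++ [(bucket.countP (fun w => PySem.Str.startswith w pre) : Int)]) acc := by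
    intro qs
    induction qs with
    | nil => intro acc _; rfl
    | cons q rest ih =>
      intro acc hmem
      have hq : q ≠ "" := by intro h; exact hmem (by simp [h])
      have hrest : "" ∉ rest := fun h => hmem (List.mem_cons_of_mem _ h)
      simp only [List.foldl_cons]
      rw [ih _ hrest]
      congr 1
      show (if PySem.Str.pyGet? q 0 = some '?' then _ else _) = (if PySem.Str.startswith q "?" then _ else _)
      by_cases hc : PySem.Str.pyGet? q 0 = some '?'
      · have hs : PySem.Str.startswith q "?" = true := (head_question q hq).mp hc
        rw [if_pos hc, if_pos hs]
        rw [count_eq words (PySem.Str.len q) _ PySem.Str.endswith endswith_empty, bucket_eq]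
      · have hs : ¬ PySem.Str.startswith q "?" = true := fun h => hc ((head_question q hq).mpr h)
        rw [if_neg hc, if_neg hs]
        rw [count_eq words (PySem.Str.len q) _ PySem.Str.startswith startswith_empty, bucket_eq]
  exact hrec queries [] hpre
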